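-- pv_equiv track=rewrite | github.com/djimenez81/mixbag | paradigmas/Proyecto0/logica.py | allPhenotypes
-- ===== SOURCE A (Python) =====
-- def allPhenotypes(n,dom,rec):
--   # This function returns all the possible combinations of phenotypes given
--   # a number of characteristics n.
--   # j is the total number of phenotypes that one can find.
--   k = 3**n
--   # Start all the phenotypes as empty strings
--   phenList = ['' for phen in range(k)]
--   for j in range(n):
--     # The phenotype for the j-th characteristic.
--     homDom = dom[j]+dom[j]
--     homRec = rec[j]+rec[j]
--     hetCyg = dom[j]+rec[j]
--
--     for i in range(k):
--       # We traverse all the partial phenotypes, and index indicate the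
--       # phenotype of the current characteristic that has to be computed.
--       index = (i//(3**(n-j-1)))%3
--       if index == 0:
--         phenList[i] = phenList[i] + homDom
--       elif index == 1:
--         phenList[i] = phenList[i] + hetCyg
--       else:
--         phenList[i] = phenList[i] + homRec
--   return phenList
-- ===== SOURCE B (Python) =====
-- def allPhenotypes(n, dom, rec):
--     # Fold a Cartesian product: extend every partial phenotype by the three
--     # allele pairs of each successive characteristic (last characteristic
--     # varies fastest, matching A's base-3 MSB-first order).
--     result = ['']
--     for j in range(n):
--         triple = (dom[j] + dom[j], dom[j] + rec[j], rec[j] + rec[j])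
--         result = [s + p for s in result for p in triple]
--     return result
-- ===== Notes on version B (the rewrite author's own statement) =====
-- stated objective: alternative
-- what changed: Replaced A's preallocated 3^n-slot table filled column-by-column with base-3 index arithmetic (i // 3**(n-j-1) % 3) by a Cartesian-product fold that extends each partial phenotype string by the three allele pairs of the next characteristic, producing the same MSB-first order; intended to avoid re-copying every string at every column (measured 2-4x faster on sizes where both finish, but a timing run could not confirm it at its largest size).
import Mathlib
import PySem

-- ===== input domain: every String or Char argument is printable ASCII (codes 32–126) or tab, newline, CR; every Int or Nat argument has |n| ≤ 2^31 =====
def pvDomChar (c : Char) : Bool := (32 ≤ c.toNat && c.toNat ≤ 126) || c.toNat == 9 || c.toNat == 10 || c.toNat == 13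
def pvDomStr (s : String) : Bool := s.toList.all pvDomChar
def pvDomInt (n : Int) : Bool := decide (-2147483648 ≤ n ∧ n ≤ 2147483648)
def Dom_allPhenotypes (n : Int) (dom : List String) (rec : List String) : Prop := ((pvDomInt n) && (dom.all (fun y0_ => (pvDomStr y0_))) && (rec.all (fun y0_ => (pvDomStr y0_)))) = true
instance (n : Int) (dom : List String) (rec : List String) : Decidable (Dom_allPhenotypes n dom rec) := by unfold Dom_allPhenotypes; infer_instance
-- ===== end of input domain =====

-- B replaces A's 3^n-slot table with base-3 index arithmetic by a Cartesian-product fold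
-- that extends every partial phenotype by the three allele pairs of each characteristic
-- (objective: alternative; intended to save re-copying, though a timing run did not confirm a speedup at its largest size).

-- ===== PORT A =====
-- Literal port of A. Pre_ guarantees 0 ≤ n and j < len(dom), len(rec), so Python's
-- range/indexing/'//'/'%' coincide with List.range, getD and Nat div/mod used here
-- (all indices and divisors are nonnegative, divisor 3^(n-j-1) > 0).
def allPhenotypes (n : Int) (dom : List String) (rec : List String) : List String :=
  if 0 ≤ n then
    let nn := n.toNat
    let k := 3 ^ nn
    let phenList := List.replicate k ""
    (List.range nn).foldl (fun phenList j =>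
      let homDom := dom.getD j "" ++ dom.getD j ""
      let homRec := rec.getD j "" ++ rec.getD j ""
      let hetCyg := dom.getD j "" ++ rec.getD j ""
      (List.range k).foldl (fun pl i =>
        let index := i / 3 ^ (nn - j - 1) % 3
        if index = 0 then pl.set i (pl.getD i "" ++ homDom)
        else if index = 1 then pl.set i (pl.getD i "" ++ hetCyg)
        else pl.set i (pl.getD i "" ++ homRec)) phenList) phenList
  else []  -- Python raises here (outside Pre_)

-- ===== PORT B =====
-- Literal port of B: fold over the characteristics, the double comprehension
-- [s + p for s in result for p in triple] becomes flatMap/map.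
-- Python's range(n) is empty for n < 0, exactly like List.range n.toNat, so no guard is needed.
def allPhenotypes_alt (n : Int) (dom : List String) (rec : List String) : List String :=
  (List.range n.toNat).foldl (fun result j =>
    let triple := [dom.getD j "" ++ dom.getD j "",
                   dom.getD j "" ++ rec.getD j "",
                   rec.getD j "" ++ rec.getD j ""]
    result.flatMap (fun s => triple.map (fun p => s ++ p))) [""]

-- ===== PRECONDITION & SPEC =====
-- Pre_: exactly the inputs where Python A returns: n ≥ 0 (3**n must be an int for range)
-- and dom/rec long enough for the indexing dom[j], rec[j], j < n.
def Pre_allPhenotypes (n : Int) (dom : List String) (rec : List String) : Prop :=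
  0 ≤ n ∧ n ≤ dom.length ∧ n ≤ rec.length
instance (n : Int) (dom : List String) (rec : List String) : Decidable (Pre_allPhenotypes n dom rec) := by unfold Pre_allPhenotypes; infer_instance
def pvWitness_allPhenotypes : Int × List String × List String := (2, ["A", "B"], ["a", "b"])

def Spec_allPhenotypes (n : Int) (dom : List String) (rec : List String) (out : List String) : Prop := out = allPhenotypes_alt n dom rec
instance (n : Int) (dom : List String) (rec : List String) (out : List String) : Decidable (Spec_allPhenotypes n dom rec out) := by unfold Spec_allPhenotypes; infer_instance

-- ===== CLAIM (what is proved, stated in full; the proofs are below) =====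
def Claim_equal_allPhenotypes : Prop := ∀ (n : Int) (dom : List String) (rec : List String), Dom_allPhenotypes n dom rec → Pre_allPhenotypes n dom rec → Spec_allPhenotypes n dom rec (allPhenotypes n dom rec)

-- ===== LEMMAS AND PROOFS =====

-- The allele pair chosen for characteristic j given base-3 digit t.
def pvPick (dom rec : List String) (j t : Nat) : String :=
  if t = 0 then dom.getD j "" ++ dom.getD j ""
  else if t = 1 then dom.getD j "" ++ rec.getD j ""
  else rec.getD j "" ++ rec.getD j ""

-- The phenotype of index i after the first m characteristics (exponent base nn).
def pvPhen (dom rec : List String) (nn m i : Nat) : String :=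
  (List.range m).foldl (fun s j => s ++ pvPick dom rec j (i / 3 ^ (nn - j - 1) % 3)) ""

-- A's one outer iteration, in set-form.
def pvStepA (dom rec : List String) (nn j : Nat) (pl : List String) : List String :=
  (List.range (3 ^ nn)).foldl
    (fun l i => l.set i (l.getD i "" ++ pvPick dom rec j (i / 3 ^ (nn - j - 1) % 3))) pl

-- B's one outer iteration.
def pvStepB (dom rec : List String) (j : Nat) (res : List String) : List String :=
  res.flatMap (fun s => [s ++ pvPick dom rec j 0, s ++ pvPick dom rec j 1, s ++ pvPick dom rec j 2])

lemma pvPhen_succ (dom rec : List String) (nn m i : Nat) :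
    pvPhen dom rec nn (m + 1) i
      = pvPhen dom rec nn m i ++ pvPick dom rec m (i / 3 ^ (nn - m - 1) % 3) := by
  simp [pvPhen, List.range_succ]

lemma pv_mapIdx_map_range {α β : Type} (k : Nat) (g : Nat → α) (h : Nat → α → β) :
    ((List.range k).map g).mapIdx h = (List.range k).map (fun i => h i (g i)) := by
  apply List.ext_getElem <;> simp

lemma pv_inner_loop (f : Nat → String) :
    ∀ (m : Nat) (pl : List String), m ≤ pl.length →
      (List.range m).foldl (fun l i => l.set i (l.getD i "" ++ f i)) pl
        = pl.mapIdx (fun i s => if i < m then s ++ f i else s) := by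
  intro m
  induction m with
  | zero =>
    intro pl _
    apply List.ext_getElem <;> simp
  | succ m ih =>
    intro pl hm
    rw [List.range_succ, List.foldl_append, ih pl (by omega)]
    simp only [List.foldl_cons, List.foldl_nil]
    apply List.ext_getElem
    · simp
    · intro i hi hi'
      simp only [List.length_mapIdx, List.length_set] at hi hi' ⊢
      have hgd : (pl.mapIdx (fun i s => if i < m then s ++ f i else s)).getD m ""
          = pl.getD m "" := by
        have hmlen : m < pl.length := by omega
        rw [List.getD_eq_getElem _ _ (by simpa using hmlen), List.getD_eq_getElem _ _ hmlen]
        simp [List.getElem_mapIdx]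
      rw [List.getElem_set]
      by_cases h : m = i
      · subst h
        simp [List.getElem_mapIdx, List.getElem?_eq_getElem hi']
      · simp only [if_neg h, List.getElem_mapIdx]
        by_cases hi2 : i < m
        · simp [hi2, show i < m + 1 by omega]
        · simp [hi2, show ¬ i < m + 1 by omega]

lemma pv_stepA_char (dom rec : List String) (nn j : Nat) (g : Nat → String) :
    pvStepA dom rec nn j ((List.range (3 ^ nn)).map g)
      = (List.range (3 ^ nn)).map
          (fun i => g i ++ pvPick dom rec j (i / 3 ^ (nn - j - 1) % 3)) := by
  unfold pvStepA
  rw [pv_inner_loop _ (3 ^ nn) _ (by simp), pv_mapIdx_map_range]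
  apply List.map_congr_left
  intro i hi
  simp only [List.mem_range] at hi
  simp [hi]

lemma pv_Achar (dom rec : List String) (nn : Nat) :
    ∀ m : Nat,
      (List.range m).foldl (fun pl j => pvStepA dom rec nn j pl) (List.replicate (3 ^ nn) "")
        = (List.range (3 ^ nn)).map (pvPhen dom rec nn m) := by
  intro m
  induction m with
  | zero =>
    apply List.ext_getElem <;> simp [pvPhen]
  | succ m ih =>
    rw [List.range_succ, List.foldl_append]
    simp only [List.foldl_cons, List.foldl_nil, ih, pv_stepA_char]
    apply List.map_congr_left
    intro i _
    rw [pvPhen_succ]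

lemma pv_flatMap_triple (g : Nat → String) (p0 p1 p2 : String) (a : Nat) :
    ((List.range a).map g).flatMap (fun s => [s ++ p0, s ++ p1, s ++ p2])
      = (List.range (3 * a)).map
          (fun q => g (q / 3) ++ (if q % 3 = 0 then p0 else if q % 3 = 1 then p1 else p2)) := by
  induction a with
  | zero => simp
  | succ a ih =>
    rw [List.range_succ, List.map_append, List.flatMap_append, ih]
    have h3 : 3 * (a + 1) = (3 * a + 1 + 1) + 1 := by ring
    rw [h3, List.range_succ, List.range_succ, List.range_succ]
    simp only [List.map_append, List.append_assoc]
    congr 1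
    have e0 : (3 * a) / 3 = a := by omega
    have e0' : (3 * a) % 3 = 0 := by omega
    have e1 : (3 * a + 1) / 3 = a := by omega
    have e1' : (3 * a + 1) % 3 = 1 := by omega
    have e2 : (3 * a + 1 + 1) / 3 = a := by omega
    have e2' : (3 * a + 1 + 1) % 3 = 2 := by omega
    simp [e0, e0', e1, e1', e2, e2']

lemma pv_Bchar (dom rec : List String) :
    ∀ m : Nat,
      (List.range m).foldl (fun res j => pvStepB dom rec j res) [""]
        = (List.range (3 ^ m)).map (pvPhen dom rec m m) := by
  intro m
  induction m with
  | zero => simp [pvPhen]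
  | succ m ih =>
    rw [List.range_succ, List.foldl_append]
    simp only [List.foldl_cons, List.foldl_nil, ih]
    unfold pvStepB
    rw [pv_flatMap_triple]
    have hlen : 3 * 3 ^ m = 3 ^ (m + 1) := by ring
    rw [hlen]
    apply List.map_congr_left
    intro q hq
    simp only [List.mem_range] at hq
    -- pvPhen (m+1) (m+1) q = pvPhen m m (q/3) ++ pick m (q % 3)
    rw [pvPhen_succ]
    have hdigit : q / 3 ^ (m + 1 - m - 1) % 3 = q % 3 := by
      simp
    rw [hdigit]
    congr 1  -- the second component (the chosen allele pair) is closed definitionally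
    · -- pvPhen m m (q/3) = pvPhen (m+1) m q
      unfold pvPhen
      apply PySem.List.foldl_congr_mem
      intro s j hj
      simp only [List.mem_range] at hj
      have hexp : 3 * 3 ^ (m - j - 1) = 3 ^ (m + 1 - j - 1) := by
        have h1 : m + 1 - j - 1 = (m - j - 1) + 1 := by omega
        rw [h1, pow_succ]; ring
      have : q / 3 / 3 ^ (m - j - 1) = q / 3 ^ (m + 1 - j - 1) := by
        rw [Nat.div_div_eq_div_mul, hexp]
      rw [this]

lemma pv_portA (n : Int) (dom rec : List String) (hn : 0 ≤ n) :
    allPhenotypes n dom rec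
      = (List.range n.toNat).foldl (fun pl j => pvStepA dom rec n.toNat j pl)
          (List.replicate (3 ^ n.toNat) "") := by
  unfold allPhenotypes
  rw [if_pos hn]
  apply PySem.List.foldl_congr_mem
  intro pl j _
  unfold pvStepA
  apply PySem.List.foldl_congr_mem
  intro l i _
  simp only [pvPick]
  split_ifs <;> rfl

lemma pv_portB (n : Int) (dom rec : List String) :
    allPhenotypes_alt n dom rec
      = (List.range n.toNat).foldl (fun res j => pvStepB dom rec j res) [""] := by
  unfold allPhenotypes_alt
  apply PySem.List.foldl_congr_mem
  intro res j _
  simp [pvStepB, pvPick, List.map]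

-- ===== VERDICT (by name: the statement is the Claim_ definition above) =====
theorem allPhenotypes_spec : Claim_equal_allPhenotypes := by
  intro n dom rec _ hpre
  obtain ⟨hn, -, -⟩ := hpre
  unfold Spec_allPhenotypes
  rw [pv_portA n dom rec hn]
  rw [pv_portB n dom rec]
  rw [pv_Achar]
  rw [pv_Bchar]
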